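-- pv_equiv track=rewrite | github.com/akharris381/6.009 | sat_solver.py | assignments_to_sudoku_board
-- ===== SOURCE A (Python) =====
-- def assignments_to_sudoku_board(assignments, n):
--     """
--     Given a variable assignment as given by satisfying_assignment, as well as a
--     size n, construct an n-by-n 2-d array (list-of-lists) representing the
--     solution given by the provided assignment of variables.
--
--     If the given assignments correspond to an unsolvable board, return None
--     instead.
--     """
--     if assignments is None:
--         return None
--
--     cells = set(assignments.keys())
--     board = [[0 for _ in range(n)] for _ in range(n)]
--     for row in range(n):
--         for col in range(n):
--             no_assignment = True
--             for i in range(1, n + 1):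
--                 if (row, col, i) in cells:
--                     if assignments[(row, col, i)]:
--                         board[row][col] = i
--                         no_assignment = False
--                         break
--             if no_assignment:
--                 return None
--     return board
-- ===== SOURCE B (Python) =====
-- def assignments_to_sudoku_board(assignments, n):
--     """One pass over the assignment items keeping the smallest true digit per
--     cell in a dict, then assemble the board; None if a cell got no digit."""
--     if assignments is None:
--         return None
--     best = {}
--     for (r, c, i), v in assignments.items():
--         if v and 0 <= r < n and 0 <= c < n and 1 <= i <= n:
--             cur = best.get((r, c))
--             if cur is None or i < cur:
--                 best[(r, c)] = i
--     board = []
--     for r in range(n):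
--         row = []
--         for c in range(n):
--             val = best.get((r, c))
--             if val is None:
--                 return None
--             row.append(val)
--         board.append(row)
--     return board
-- ===== Notes on version B (the rewrite author's own statement) =====
-- stated objective: faster
-- what changed: A scans, for every one of the n*n cells, all n digits against the assignment dict (triple loop); B makes one pass over the assignment items keeping the smallest true digit per cell in a dict, then assembles the board in a single n*n scan.
import Mathlib
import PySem

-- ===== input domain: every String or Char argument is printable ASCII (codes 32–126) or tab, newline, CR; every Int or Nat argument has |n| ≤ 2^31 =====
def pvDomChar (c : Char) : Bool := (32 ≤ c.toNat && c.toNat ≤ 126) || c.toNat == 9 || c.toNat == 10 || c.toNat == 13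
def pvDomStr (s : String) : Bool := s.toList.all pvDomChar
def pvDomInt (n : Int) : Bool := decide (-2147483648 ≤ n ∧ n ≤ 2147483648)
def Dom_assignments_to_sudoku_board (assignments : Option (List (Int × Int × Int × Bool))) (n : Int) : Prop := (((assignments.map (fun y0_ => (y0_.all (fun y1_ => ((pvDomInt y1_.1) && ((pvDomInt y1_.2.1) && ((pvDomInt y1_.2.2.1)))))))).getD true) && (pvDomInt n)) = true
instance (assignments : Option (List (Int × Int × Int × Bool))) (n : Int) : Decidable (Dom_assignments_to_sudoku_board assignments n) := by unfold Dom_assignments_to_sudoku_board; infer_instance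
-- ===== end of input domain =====

-- B replaces A's per-cell scan over all n digits (O(n^3) in total) by ONE pass over the
-- assignment items that keeps, per cell, the smallest true digit in a dict, then a plain
-- O(n^2) assembly scan (objective: faster).

-- ===== PORT A =====
-- inner 'for i in range(1, n+1): if (row,col,i) in cells: if assignments[...]: break'
def pvA_scan (d : PySem.Dict (Int × Int × Int) Bool) (row col : Int) : List Int → Option Int
  | [] => none
  | i :: rest =>
    match d.get? (row, col, i) with
    | some v => if v then some i else pvA_scan d row col rest
    | none => pvA_scan d row col rest

def assignments_to_sudoku_board (assignments : Option (List (Int × Int × Int × Bool))) (n : Int) : Option (List (List Int)) :=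
  match assignments with
  | none => none
  | some ps =>
    let d : PySem.Dict (Int × Int × Int) Bool :=
      PySem.Dict.mk (ps.map (fun t => ((t.1, t.2.1, t.2.2.1), t.2.2.2)))
    (PySem.List.pyRange 0 n 1).mapM (fun row =>
      (PySem.List.pyRange 0 n 1).mapM (fun col =>
        pvA_scan d row col (PySem.List.pyRange 1 (n + 1) 1)))

-- ===== PORT B =====
-- 'if v and 0 <= r < n and 0 <= c < n and 1 <= i <= n'
def pvB_ok (n : Int) (t : Int × Int × Int × Bool) : Bool :=
  t.2.2.2 && decide (0 ≤ t.1) && decide (t.1 < n) && decide (0 ≤ t.2.1) && decide (t.2.1 < n)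
    && decide (1 ≤ t.2.2.1) && decide (t.2.2.1 ≤ n)

-- loop body: keep the smallest eligible true digit per cell
def pvB_step (n : Int) (best : PySem.Dict (Int × Int) Int) (t : Int × Int × Int × Bool) :
    PySem.Dict (Int × Int) Int :=
  if pvB_ok n t then
    match best.get? (t.1, t.2.1) with
    | none => best.insert (t.1, t.2.1) t.2.2.1
    | some cur => if t.2.2.1 < cur then best.insert (t.1, t.2.1) t.2.2.1 else best
  else best

def assignments_to_sudoku_board_alt (assignments : Option (List (Int × Int × Int × Bool))) (n : Int) : Option (List (List Int)) :=
  match assignments with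
  | none => none
  | some ps =>
    let best := ps.foldl (pvB_step n) PySem.Dict.empty
    (PySem.List.pyRange 0 n 1).mapM (fun r =>
      (PySem.List.pyRange 0 n 1).mapM (fun c => best.get? (r, c)))

-- ===== PRECONDITION & SPEC =====
-- Pre_ excludes association lists with a duplicated (row, col, digit) key: such a list does not
-- correspond to a Python dict (A's parameter), and first-vs-last occurrence is an arbitrary choice.
def Pre_assignments_to_sudoku_board (assignments : Option (List (Int × Int × Int × Bool))) (n : Int) : Prop :=
  ((assignments.getD []).map (fun t => (t.1, t.2.1, t.2.2.1))).Nodup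

instance (assignments : Option (List (Int × Int × Int × Bool))) (n : Int) : Decidable (Pre_assignments_to_sudoku_board assignments n) := by unfold Pre_assignments_to_sudoku_board; infer_instance

def pvWitness_assignments_to_sudoku_board : (Option (List (Int × Int × Int × Bool))) × Int :=
  (some [(0, 0, 1, true)], 1)

def Spec_assignments_to_sudoku_board (assignments : Option (List (Int × Int × Int × Bool))) (n : Int) (out : Option (List (List Int))) : Prop := out = assignments_to_sudoku_board_alt assignments n
instance (assignments : Option (List (Int × Int × Int × Bool))) (n : Int) (out : Option (List (List Int))) : Decidable (Spec_assignments_to_sudoku_board assignments n out) := by unfold Spec_assignments_to_sudoku_board; infer_instance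

-- ===== CLAIM (what is proved, stated in full; the proofs are below) =====
def Claim_equal_assignments_to_sudoku_board : Prop := ∀ (assignments : Option (List (Int × Int × Int × Bool))) (n : Int), Dom_assignments_to_sudoku_board assignments n → Pre_assignments_to_sudoku_board assignments n → Spec_assignments_to_sudoku_board assignments n (assignments_to_sudoku_board assignments n)

-- ===== LEMMAS AND PROOFS =====

-- running minimum as an Option (proof-side view of B's dict update)
def pvOmin (o : Option Int) (i : Int) : Option Int :=
  some (match o with | none => i | some c => min c i)

-- the digits B's pass records for cell (row, col)
def pvIs (row col n : Int) (ps : List (Int × Int × Int × Bool)) : List Int :=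
  (ps.filter (fun t => pvB_ok n t && decide (t.1 = row) && decide (t.2.1 = col))).map
    (fun t => t.2.2.1)

lemma pvMapM_congr {α β : Type} (f g : α → Option β) (l : List α)
    (h : ∀ x ∈ l, f x = g x) : l.mapM f = l.mapM g := by
  induction l with
  | nil => rfl
  | cons x t ih =>
    simp only [List.mapM_cons, h x (List.mem_cons_self), ih fun y hy => h y (List.mem_cons_of_mem _ hy)]

-- B's fold, observed at one cell, is a running minimum over pvIs
lemma pvB_fold_get (row col n : Int) (ps : List (Int × Int × Int × Bool))
    (best : PySem.Dict (Int × Int) Int) :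
    (ps.foldl (pvB_step n) best).get? (row, col)
      = (pvIs row col n ps).foldl pvOmin (best.get? (row, col)) := by
  induction ps generalizing best with
  | nil => rfl
  | cons t rest ih =>
    by_cases hok : pvB_ok n t = true
    · by_cases hk : (t.1, t.2.1) = (row, col)
      · have h1 : t.1 = row := congrArg Prod.fst hk
        have h2 : t.2.1 = col := congrArg Prod.snd hk
        have hstep : (pvB_step n best t).get? (row, col) = pvOmin (best.get? (row, col)) t.2.2.1 := by
          simp only [pvB_step, hok, if_true]
          rw [← h1, ← h2]
          cases hg : best.get? (t.1, t.2.1) with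
          | none => simp [pvOmin, PySem.Dict.get?_insert_self]
          | some cur =>
            by_cases hlt : t.2.2.1 < cur
            · simp [hlt, pvOmin, PySem.Dict.get?_insert_self, min_eq_right (le_of_lt hlt)]
            · simp [hlt, pvOmin, hg, min_eq_left (le_of_not_gt hlt)]
        have hfil : pvIs row col n (t :: rest) = t.2.2.1 :: pvIs row col n rest := by
          simp [pvIs, hok, h1, h2]
        rw [List.foldl_cons, ih, hstep, hfil, List.foldl_cons]
      · have hstep : (pvB_step n best t).get? (row, col) = best.get? (row, col) := by
          simp only [pvB_step, hok, if_true]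
          cases hg : best.get? (t.1, t.2.1) with
          | none => exact PySem.Dict.get?_insert_of_ne _ _ (Ne.symm hk)
          | some cur =>
            by_cases hlt : t.2.2.1 < cur
            · simp only [hlt, if_true]; exact PySem.Dict.get?_insert_of_ne _ _ (Ne.symm hk)
            · simp [hlt]
        have hfil : pvIs row col n (t :: rest) = pvIs row col n rest := by
          have : ¬ (t.1 = row ∧ t.2.1 = col) := by
            intro ⟨a, b⟩; exact hk (by rw [a, b])
          simp only [pvIs, List.filter_cons]
          by_cases h1 : t.1 = row
          · have h2 : ¬ t.2.1 = col := fun h => this ⟨h1, h⟩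
            simp [h1, h2]
          · simp [h1]
        rw [List.foldl_cons, ih, hstep, hfil]
    · have hstep : pvB_step n best t = best := by simp [pvB_step, hok]
      have hfil : pvIs row col n (t :: rest) = pvIs row col n rest := by
        simp [pvIs, hok]
      rw [List.foldl_cons, hstep, ih, hfil]

lemma pvFoldlOmin_some (l : List Int) (a : Int) :
    l.foldl pvOmin (some a) = some (l.foldl min a) := by
  induction l generalizing a with
  | nil => rfl
  | cons x t ih => simp [List.foldl_cons, pvOmin, ih]

lemma pvFoldlOmin_none (l : List Int) : l.foldl pvOmin none = l.min? := by
  cases l with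
  | nil => rfl
  | cons a t =>
    rw [List.foldl_cons, List.min?_cons']
    exact pvFoldlOmin_some t a

-- A's inner scan is find? of the truthiness test
lemma pvA_scan_eq_find (d : PySem.Dict (Int × Int × Int) Bool) (row col : Int) (l : List Int) :
    pvA_scan d row col l = l.find? (fun i => d.getD (row, col, i) false) := by
  induction l with
  | nil => rfl
  | cons i rest ih =>
    rw [pvA_scan, List.find?_cons]
    rw [PySem.Dict.getD_eq_get?_getD]
    cases hg : d.get? (row, col, i) with
    | none => exact ih
    | some v => cases v <;> simpa using ih

lemma pvFoldlMin_of_le (s : List Int) (a : Int) (h : ∀ x ∈ s, a ≤ x) :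
    s.foldl min a = a := by
  induction s generalizing a with
  | nil => rfl
  | cons x t ih =>
    rw [List.foldl_cons, min_eq_left (h x (List.mem_cons_self))]
    exact ih a fun y hy => h y (List.mem_cons_of_mem _ hy)

-- on a strictly increasing list, the first hit is the least hit
lemma pvFind_sorted (l : List Int) (p : Int → Bool) (hl : l.Pairwise (· < ·)) :
    l.find? p = (l.filter p).min? := by
  induction l with
  | nil => rfl
  | cons a t ih =>
    obtain ⟨ha, ht⟩ := List.pairwise_cons.mp hl
    by_cases hp : p a = true
    · rw [List.find?_cons_of_pos hp, List.filter_cons_of_pos hp, List.min?_cons']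
      rw [pvFoldlMin_of_le _ a fun x hx => le_of_lt (ha x (List.mem_of_mem_filter hx))]
    · rw [List.find?_cons_of_neg (by simp [hp]), List.filter_cons_of_neg (by simp [hp]), ih ht]

lemma pvMin?_congr (l₁ l₂ : List Int) (h : ∀ x, x ∈ l₁ ↔ x ∈ l₂) : l₁.min? = l₂.min? := by
  cases h1 : l₁.min? with
  | none =>
    rw [List.min?_eq_none_iff] at h1
    subst h1
    have : l₂ = [] := List.eq_nil_iff_forall_not_mem.mpr fun x hx => by simp [← h x] at hx
    rw [this]
    rfl
  | some m =>
    rw [List.min?_eq_some_iff] at h1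
    exact (List.min?_eq_some_iff.mpr ⟨(h m).mp h1.1, fun b hb => h1.2 b ((h b).mpr hb)⟩).symm

-- the central cell lemma
lemma pvCell (n row col : Int) (ps : List (Int × Int × Int × Bool))
    (hnd : (ps.map (fun t => (t.1, t.2.1, t.2.2.1))).Nodup)
    (hr0 : 0 ≤ row) (hrn : row < n) (hc0 : 0 ≤ col) (hcn : col < n) :
    pvA_scan (PySem.Dict.mk (ps.map (fun t => ((t.1, t.2.1, t.2.2.1), t.2.2.2)))) row col
        (PySem.List.pyRange 1 (n + 1) 1)
      = (ps.foldl (pvB_step n) PySem.Dict.empty).get? (row, col) := by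
  set d := PySem.Dict.mk (ps.map (fun t => ((t.1, t.2.1, t.2.2.1), t.2.2.2))) with hd
  have hkeys : d.keys.Nodup := by
    simpa [hd, PySem.Dict.keys, List.map_map, Function.comp] using hnd
  have hmem : ∀ m : Int, d.getD (row, col, m) false = true ↔ (row, col, m, true) ∈ ps := by
    intro m
    rw [PySem.Dict.getD_eq_get?_getD]
    constructor
    · intro hgd
      cases hg : d.get? (row, col, m) with
      | none => rw [hg] at hgd; simp at hgd
      | some v =>
        rw [hg] at hgd; simp at hgd; subst hgd
        have := PySem.Dict.mem_items_of_get?_eq_some _ hg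
        simp only [hd] at this
        obtain ⟨t, htps, hteq⟩ := List.mem_map.mp this
        obtain ⟨t1, t2, t3, t4⟩ := t
        simp at hteq
        obtain ⟨⟨e1, e2, e3⟩, e4⟩ := hteq
        subst e1; subst e2; subst e3; subst e4
        exact htps
    · intro hps
      have : ((row, col, m), true) ∈ d.items := by
        simp only [hd]
        exact List.mem_map.mpr ⟨(row, col, m, true), hps, rfl⟩
      rw [PySem.Dict.get?_of_mem_items _ this hkeys]
      rfl
  rw [pvA_scan_eq_find, pvB_fold_get, PySem.Dict.get?_empty, pvFoldlOmin_none,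
    pvFind_sorted _ _ (PySem.List.pairwise_lt_pyRange_one 1 (n + 1))]
  apply pvMin?_congr
  intro m
  constructor
  · intro hx
    have hmr := PySem.List.mem_pyRange_one.mp (List.mem_of_mem_filter hx)
    have hp := List.of_mem_filter hx
    simp only at hp
    have hin := (hmem m).mp hp
    refine List.mem_map.mpr ⟨(row, col, m, true), List.mem_filter.mpr ⟨hin, ?_⟩, rfl⟩
    simp [pvB_ok]
    omega
  · intro hx
    obtain ⟨t, htf, hti⟩ := List.mem_map.mp hx
    have htps := List.mem_of_mem_filter htf
    have hok := List.of_mem_filter htf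
    obtain ⟨t1, t2, t3, t4⟩ := t
    simp only [pvB_ok, Bool.and_eq_true, decide_eq_true_eq] at hok
    obtain ⟨⟨⟨⟨⟨⟨⟨⟨hv, _⟩, _⟩, _⟩, _⟩, h1m⟩, hmn⟩, he1⟩, he2⟩ := hok
    simp only at hti hv he1 he2
    subst hti; subst he1; subst he2
    cases t4 with
    | false => simp at hv
    | true =>
      exact List.mem_filter.mpr ⟨PySem.List.mem_pyRange_one.mpr ⟨h1m, by omega⟩,
        (hmem t3).mpr htps⟩

-- ===== VERDICT (by name: the statement is the Claim_ definition above) =====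
theorem assignments_to_sudoku_board_spec : Claim_equal_assignments_to_sudoku_board := by
  intro assignments n _ hpre
  unfold Spec_assignments_to_sudoku_board
  cases assignments with
  | none => rfl
  | some ps =>
    simp only [assignments_to_sudoku_board, assignments_to_sudoku_board_alt]
    apply pvMapM_congr
    intro row hrow
    obtain ⟨hr0, hrn⟩ := PySem.List.mem_pyRange_one.mp hrow
    apply pvMapM_congr
    intro col hcol
    obtain ⟨hc0, hcn⟩ := PySem.List.mem_pyRange_one.mp hcol
    exact pvCell n row col ps (by simpa [Pre_assignments_to_sudoku_board] using hpre) hr0 hrn hc0 hcn
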